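-- pv_equiv track=rewrite | github.com/ramyasingh3/todo | DSA4/longest_valid_parentheses.py | getValidParentheses
-- ===== SOURCE A (Python) =====
-- def getValidParentheses(s: str) -> list[str]:
--     """
--     Get all valid parentheses substrings.
--
--     Args:
--         s: Input string containing only '(' and ')'
--
--     Returns:
--         List of all valid parentheses substrings
--     """
--     def isValid(sub: str) -> bool:
--         count = 0
--         for char in sub:
--             if char == '(':
--                 count += 1
--             else:
--                 count -= 1
--             if count < 0:
--                 return False
--         return count == 0
--
--     n = len(s)
--     valid_substrings = []
--
--     for i in range(n):
--         for j in range(i + 2, n + 1, 2):  # Only check even lengths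
--             substring = s[i:j]
--             if isValid(substring):
--                 valid_substrings.append(substring)
--
--     return valid_substrings
-- ===== SOURCE B (Python) =====
-- def getValidParentheses(s: str) -> list[str]:
--     """
--     Get all valid parentheses substrings.
--
--     Per-start incremental balance scan: for each start index extend a running
--     balance; break once it goes negative (no longer substring from this start
--     is valid), and emit a substring whenever the balance returns to zero.
--     """
--     n = len(s)
--     valid_substrings = []
--     for i in range(n):
--         count = 0
--         for j in range(i, n):
--             count += 1 if s[j] == '(' else -1
--             if count < 0:
--                 break
--             if count == 0:
--                 valid_substrings.append(s[i:j + 1])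
--     return valid_substrings
-- ===== Notes on version B (the rewrite author's own statement) =====
-- stated objective: faster
-- what changed: Replaced the O(n^3) enumerate-every-even-substring-and-revalidate scan with a per-start incremental balance scan that breaks once the balance goes negative and emits a substring whenever the balance returns to zero.
import Mathlib
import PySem

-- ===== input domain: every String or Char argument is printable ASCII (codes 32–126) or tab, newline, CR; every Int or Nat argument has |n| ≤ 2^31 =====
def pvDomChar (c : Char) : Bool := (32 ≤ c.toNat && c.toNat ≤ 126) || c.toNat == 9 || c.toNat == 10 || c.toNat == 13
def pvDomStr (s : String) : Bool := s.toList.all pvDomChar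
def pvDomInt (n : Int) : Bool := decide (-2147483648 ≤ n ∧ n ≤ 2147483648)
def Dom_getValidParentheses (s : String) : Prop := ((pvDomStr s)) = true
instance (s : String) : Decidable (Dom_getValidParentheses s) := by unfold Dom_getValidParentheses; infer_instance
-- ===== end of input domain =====

-- B replaces A's enumerate-every-even-substring-and-revalidate scan by a per-start
-- incremental balance scan (break on negative balance, emit on zero) — faster in a timing run.

-- ===== PORT A =====
-- A's nested helper isValid, iterating the substring's characters with a running count
def pvIsValid : Int → List Char → Bool
  | count, [] => count == 0
  | count, ch :: rest =>
    let c := if ch = '(' then count + 1 else count - 1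
    if c < 0 then false else pvIsValid c rest

def getValidParentheses (s : String) : List String :=
  let n := PySem.Str.len s
  (PySem.List.pyRange 0 n).foldl (fun acc i =>
    (PySem.List.pyRange (i + 2) (n + 1) 2).foldl (fun acc2 j =>
      let substring := PySem.Str.slice s (some i) (some j)
      if pvIsValid 0 substring.toList then acc2 ++ [substring] else acc2) acc) []

-- ===== PORT B =====
-- B's inner loop 'for j in range(i, n)': walk the remaining characters, carrying the
-- current index j and running count; break (return acc) once count < 0, emit on count = 0
def pvInnerB (s : String) (i : Int) : List Char → Int → Int → List String → List String
  | [], _, _, acc => acc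
  | ch :: rest, j, count, acc =>
    let c := count + (if ch = '(' then 1 else -1)
    if c < 0 then acc
    else if c = 0 then
      pvInnerB s i rest (j + 1) c (acc ++ [PySem.Str.slice s (some i) (some (j + 1))])
    else pvInnerB s i rest (j + 1) c acc

def getValidParentheses_alt (s : String) : List String :=
  let n : Int := s.toList.length
  (PySem.List.pyRange 0 n).foldl (fun acc i => pvInnerB s i (s.toList.drop i.toNat) i 0 acc) []

-- ===== PRECONDITION & SPEC =====
def Spec_getValidParentheses (s : String) (out : List String) : Prop := out = getValidParentheses_alt s
instance (s : String) (out : List String) : Decidable (Spec_getValidParentheses s out) := by unfold Spec_getValidParentheses; infer_instance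

-- ===== CLAIM (what is proved, stated in full; the proofs are below) =====
def Claim_equal_getValidParentheses : Prop := ∀ (s : String), Dom_getValidParentheses s → Spec_getValidParentheses s (getValidParentheses s)

-- ===== LEMMAS AND PROOFS =====

-- B's inner loop only ever appends to its accumulator
theorem pvInnerB_append (s : String) (i : Int) :
    ∀ (rem : List Char) (j count : Int) (acc : List String),
      pvInnerB s i rem j count acc = acc ++ pvInnerB s i rem j count [] := by
  intro rem
  induction rem with
  | nil => intro j count acc; simp [pvInnerB]
  | cons ch rest ih =>
    intro j count acc
    simp only [pvInnerB, List.nil_append]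
    split_ifs
    all_goals first
      | simp
      | (rw [ih _ _ (acc ++ _), ih _ _ ([_])]; simp)
      | rw [ih _ _ acc]

-- a valid piece has even length: each character flips the running count's parity
theorem pvIsValid_parity :
    ∀ (u : List Char) (a : Int), pvIsValid a u = true → (a + u.length) % 2 = 0 := by
  intro u
  induction u with
  | nil => intro a h; simp [pvIsValid] at h; simp [h]
  | cons ch rest ih =>
    intro a h
    by_cases hch : ch = '(' <;>
      simp only [pvIsValid, hch, if_pos, ite_false] at h <;>
      split_ifs at h with hg <;>
      try (simp at h)
    · have := ih _ h; simp; omega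
    · have := ih _ h; simp; omega

-- characterisation of B's inner scan: it emits exactly the validating prefixes, in order
theorem pvInnerB_eq (s : String) (i : Int) :
    ∀ (rem : List Char) (j count : Int),
      pvInnerB s i rem j count [] =
        ((List.range rem.length).filter (fun k => pvIsValid count (rem.take (k + 1)))).map
          (fun (k : Nat) => PySem.Str.slice s (some i) (some (j + ↑k + 1))) := by
  intro rem
  induction rem with
  | nil => intro j count; simp [pvInnerB]
  | cons ch rest ih =>
    intro j count
    have hstep : ∀ (u : List Char), pvIsValid count (ch :: u)
        = (if count + (if ch = '(' then 1 else -1) < 0 then false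
           else pvIsValid (count + (if ch = '(' then 1 else -1)) u) := by
      intro u
      by_cases hch : ch = '(' <;> simp [pvIsValid, hch] <;> ring_nf
    set c := count + (if ch = '(' then 1 else -1) with hc
    simp only [pvInnerB]
    rw [← hc]
    rw [List.length_cons, List.range_succ_eq_map, List.filter_cons]
    have hhead : (pvIsValid count ((ch :: rest).take (0 + 1)) : Bool)
        = (if c < 0 then false else c == 0) := by
      rw [show ((ch :: rest).take (0 + 1)) = [ch] by simp]
      rw [hstep []]
      simp [pvIsValid]
    have htail : (List.map Nat.succ (List.range rest.length)).filter
          (fun k => pvIsValid count ((ch :: rest).take (k + 1)))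
        = ((List.range rest.length).filter
            (fun k => if c < 0 then false else pvIsValid c (rest.take (k + 1)))).map Nat.succ := by
      rw [List.filter_map]
      congr 1
      apply List.filter_congr
      intro k _
      simp only [Function.comp_apply]
      rw [show Nat.succ k + 1 = (k + 1) + 1 from rfl, List.take_succ_cons, hstep]
    rw [hhead, htail]
    by_cases hneg : c < 0
    · rw [if_pos hneg]
      simp [hneg]
    · simp only [if_neg hneg]
      have hmm : ∀ (L : List Nat),
          (L.map Nat.succ).map (fun (k : Nat) => PySem.Str.slice s (some i) (some (j + ↑k + 1)))
          = L.map (fun (k : Nat) => PySem.Str.slice s (some i) (some ((j + 1) + ↑k + 1))) := by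
        intro L
        rw [List.map_map]
        apply List.map_congr_left
        intro k _
        simp only [Function.comp_apply, Nat.succ_eq_add_one]
        push_cast
        ring_nf
      by_cases hz : c = 0
      · have hb : (c == 0) = true := by simp [hz]
        rw [hb, if_pos rfl]
        rw [pvInnerB_append, List.nil_append, List.map_cons, hmm, ih (j + 1) c]
        simp [hz]
      · have hb : (c == 0) = false := by simp [hz]
        rw [hb, if_neg Bool.false_ne_true, hmm, ih (j + 1) c, if_neg hz]

-- the even offsets among 1..Ln, in order
theorem evens_range :
    ∀ (Ln : Nat), ((List.range Ln).map (· + 1)).filter (fun ℓ => ℓ % 2 == 0)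
      = (List.range (Ln / 2)).map (fun k => 2 * k + 2) := by
  intro Ln
  induction Ln with
  | zero => simp
  | succ n ih =>
    rw [List.range_succ, List.map_append, List.filter_append, ih]
    by_cases h : (n + 1) % 2 = 0
    · have h2 : (n + 1) / 2 = n / 2 + 1 := by omega
      rw [h2, List.range_succ, List.map_append]
      simp [h]
      omega
    · have h2 : (n + 1) / 2 = n / 2 := by omega
      rw [h2]
      simp [h]

-- filtering a predicate that only holds on evens over all lengths = over even lengths
theorem filter_evens (vld : Nat → Bool) (Ln : Nat)
    (h : ∀ ℓ, 1 ≤ ℓ → ℓ ≤ Ln → vld ℓ = true → ℓ % 2 = 0) :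
    ((List.range (Ln / 2)).map (fun k => 2 * k + 2)).filter vld
      = ((List.range Ln).map (· + 1)).filter vld := by
  rw [← evens_range, List.filter_filter]
  apply List.filter_congr
  intro x hx
  simp only [List.mem_map, List.mem_range] at hx
  obtain ⟨k, hk, rfl⟩ := hx
  by_cases hv : vld (k + 1) = true
  · have := h (k + 1) (by omega) (by omega) hv
    simp [hv, this]
  · simp at hv
    simp [hv]

-- per-start equality: A's inner loop over even end positions = B's scan from start iN
theorem perStart (s : String) (iN : Nat) (hi : iN < s.toList.length) (acc : List String) :
    (PySem.List.pyRange ((iN : Int) + 2) ((s.toList.length : Int) + 1) 2).foldl (fun acc2 j =>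
        let substring := PySem.Str.slice s (some (iN : Int)) (some j)
        if pvIsValid 0 substring.toList then acc2 ++ [substring] else acc2) acc
      = pvInnerB s (iN : Int) (s.toList.drop iN) (iN : Int) 0 acc := by
  have hfold := PySem.List.foldl_append_if
    (fun j => pvIsValid 0 (PySem.Str.slice s (some (iN : Int)) (some j)).toList)
    (fun j => PySem.Str.slice s (some (iN : Int)) (some j))
    (PySem.List.pyRange ((iN : Int) + 2) ((s.toList.length : Int) + 1) 2) acc
  rw [show (fun (acc2 : List String) (j : Int) =>
        let substring := PySem.Str.slice s (some (iN : Int)) (some j)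
        if pvIsValid 0 substring.toList then acc2 ++ [substring] else acc2)
      = (fun acc2 j => if pvIsValid 0 (PySem.Str.slice s (some (iN : Int)) (some j)).toList
          then acc2 ++ [PySem.Str.slice s (some (iN : Int)) (some j)] else acc2) from rfl,
    hfold, pvInnerB_append, pvInnerB_eq]
  congr 1
  set L := s.toList.length with hL
  set t := s.toList.drop iN with ht
  have htlen : t.length = L - iN := by rw [ht, List.length_drop]
  have hslice : ∀ (ℓ : Nat),
      (PySem.Str.slice s (some (iN : Int)) (some ((iN : Int) + (ℓ : Int)))).toList = t.take ℓ := by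
    intro ℓ
    rw [PySem.Str.toList_slice, PySem.Chars.slice_eq_listSlice,
      show ((iN : Int) + (ℓ : Int)) = ((iN + ℓ : Nat) : Int) by push_cast; ring,
      PySem.List.slice_natCast]
    rw [ht]
    congr 1
    omega
  rw [PySem.List.pyRange_of_pos _ _ (by norm_num : (0:Int) < 2)]
  have hM : (if (iN : Int) + 2 < (L : Int) + 1
      then ((((L : Int) + 1) - ((iN : Int) + 2) + 2 - 1) / 2).toNat else 0) = (L - iN) / 2 := by
    split_ifs with hcond <;> omega
  rw [hM, List.filter_map, List.map_map]
  -- A's side as a map over even lengths ℓ = 2k+2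
  have hpA : ((fun j => pvIsValid 0 (PySem.Str.slice s (some (iN : Int)) (some j)).toList) ∘
        (fun k : Nat => (iN : Int) + 2 + 2 * (k : Int)))
      = (fun k : Nat => pvIsValid 0 (t.take (2 * k + 2))) := by
    funext k
    simp only [Function.comp_apply,
      show ((iN : Int) + 2 + 2 * (k : Int)) = ((iN : Int) + ((2 * k + 2 : Nat) : Int)) by push_cast; ring,
      hslice]
  have hfA : ((fun j => PySem.Str.slice s (some (iN : Int)) (some j)) ∘
        (fun k : Nat => (iN : Int) + 2 + 2 * (k : Int)))
      = (fun k : Nat => PySem.Str.slice s (some (iN : Int)) (some ((iN : Int) + ((2 * k + 2 : Nat) : Int)))) := by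
    funext k
    simp only [Function.comp_apply]
    rw [show ((iN : Int) + 2 + 2 * (k : Int)) = ((iN : Int) + ((2 * k + 2 : Nat) : Int)) by push_cast; ring]
  rw [hpA, hfA]
  -- B's side predicates/functions in the same ℓ = k+1 form
  have hfB : (fun k : Nat => PySem.Str.slice s (some (iN : Int)) (some ((iN : Int) + (k : Int) + 1)))
      = (fun k : Nat => PySem.Str.slice s (some (iN : Int)) (some ((iN : Int) + ((k + 1 : Nat) : Int)))) := by
    funext k
    rw [show ((iN : Int) + (k : Int) + 1) = ((iN : Int) + ((k + 1 : Nat) : Int)) by push_cast; ring]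
  rw [htlen, hfB]
  -- both sides: map (slice at iN+ℓ) over (filter vld ℓ-list); reduce to the ℓ-list equality
  have hA : ((List.range ((L - iN) / 2)).filter (fun k : Nat => pvIsValid 0 (t.take (2 * k + 2)))).map
        (fun k : Nat => PySem.Str.slice s (some (iN : Int)) (some ((iN : Int) + ((2 * k + 2 : Nat) : Int))))
      = ((((List.range ((L - iN) / 2)).map (fun k => 2 * k + 2)).filter
          (fun ℓ : Nat => pvIsValid 0 (t.take ℓ))).map
          (fun ℓ : Nat => PySem.Str.slice s (some (iN : Int)) (some ((iN : Int) + (ℓ : Int))))) := by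
    rw [List.filter_map, List.map_map]
    rfl
  have hB : ((List.range (L - iN)).filter (fun k : Nat => pvIsValid 0 (t.take (k + 1)))).map
        (fun k : Nat => PySem.Str.slice s (some (iN : Int)) (some ((iN : Int) + ((k + 1 : Nat) : Int))))
      = ((((List.range (L - iN)).map (· + 1)).filter
          (fun ℓ : Nat => pvIsValid 0 (t.take ℓ))).map
          (fun ℓ : Nat => PySem.Str.slice s (some (iN : Int)) (some ((iN : Int) + (ℓ : Int))))) := by
    rw [List.filter_map, List.map_map]
    rfl
  rw [hA, hB]
  congr 1
  apply filter_evens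
  intro ℓ h1 h2 hv
  have hp := pvIsValid_parity _ _ hv
  rw [List.length_take, htlen] at hp
  omega

-- ===== VERDICT (by name: the statement is the Claim_ definition above) =====
theorem getValidParentheses_spec : Claim_equal_getValidParentheses := by
  intro s _
  unfold Spec_getValidParentheses getValidParentheses getValidParentheses_alt
  simp only [PySem.Str.len_eq]
  apply PySem.List.foldl_congr_mem
  intro acc x hx
  rw [PySem.List.mem_pyRange_one] at hx
  have hx0 : x = ((x.toNat : Nat) : Int) := by omega
  have hi : x.toNat < s.toList.length := by omega
  rw [hx0]
  exact perStart s x.toNat hi acc
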